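-- pv_equiv track=rewrite | github.com/kashkarik22i/mybot | conversation/actions.py | _compute_percentage
-- ===== SOURCE A (Python) =====
-- def _compute_percentage(moods):
--     positive = sum([1 for m in moods if m["mood"] == "positive"])
--     negative = sum([1 for m in moods if m["mood"] == "negative"])
--     neutral = sum([1 for m in moods if m["mood"] == "neutral"])
--     total = positive + negative + neutral
--     if total == 0:
--         return {"positive": 0, "negative": 0}
--     pos_percent = int((100 * positive) / total)
--     neg_percent = int((100 * negative) / total)
--     return {"positive": pos_percent, "negative": neg_percent}
-- ===== SOURCE B (Python) =====
-- def _compute_percentage(moods):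
--     positive = 0
--     negative = 0
--     total = 0
--     for m in moods:
--         mood = m["mood"]
--         if mood == "positive":
--             positive += 1
--             total += 1
--         elif mood == "negative":
--             negative += 1
--             total += 1
--         elif mood == "neutral":
--             total += 1
--     if total == 0:
--         return {"positive": 0, "negative": 0}
--     return {"positive": int((100 * positive) / total),
--             "negative": int((100 * negative) / total)}
-- ===== Notes on version B (the rewrite author's own statement) =====
-- stated objective: alternative
-- what changed: B replaces A's three staged list-comprehension scans (plus a derived sum for total) with one fused loop that classifies each mood once in an if/elif chain and maintains positive/negative/total accumulators directly, never materialising intermediate lists or a neutral count.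
import Mathlib
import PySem

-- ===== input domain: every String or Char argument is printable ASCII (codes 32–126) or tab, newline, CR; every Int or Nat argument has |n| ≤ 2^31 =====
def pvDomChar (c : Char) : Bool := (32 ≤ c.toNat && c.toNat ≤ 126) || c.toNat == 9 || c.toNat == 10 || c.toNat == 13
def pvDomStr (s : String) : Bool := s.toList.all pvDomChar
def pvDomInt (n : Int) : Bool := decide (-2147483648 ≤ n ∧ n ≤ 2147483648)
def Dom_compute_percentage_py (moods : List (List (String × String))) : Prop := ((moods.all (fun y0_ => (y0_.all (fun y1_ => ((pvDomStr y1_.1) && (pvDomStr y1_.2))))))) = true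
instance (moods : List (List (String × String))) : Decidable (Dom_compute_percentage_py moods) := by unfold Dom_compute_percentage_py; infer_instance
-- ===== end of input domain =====

-- B fuses A's three staged comprehension scans into one loop with an if/elif chain over
-- positive/negative/total accumulators (alternative decomposition, same return value).
-- Python's int((100*p)/total) (float division then truncation) is ported as integer floor
-- division; both operands are nonnegative counts bounded by the list length, where the two coincide.


-- ===== PORT A =====
-- sum([1 for m in moods if m["mood"] == s]) = countP; under Pre_ the key exists, so m["mood"] = Dict.get?
def compute_percentage_py (moods : List (List (String × String))) : List (String × Int) :=
  let positive : Int := (moods.countP (fun m => PySem.Dict.get? (PySem.Dict.mk m) "mood" == some "positive") : Int)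
  let negative : Int := (moods.countP (fun m => PySem.Dict.get? (PySem.Dict.mk m) "mood" == some "negative") : Int)
  let neutral : Int := (moods.countP (fun m => PySem.Dict.get? (PySem.Dict.mk m) "mood" == some "neutral") : Int)
  let total := positive + negative + neutral
  if total == 0 then [("positive", 0), ("negative", 0)]
  else
    let pos_percent := PySem.Int.floordiv (100 * positive) total
    let neg_percent := PySem.Int.floordiv (100 * negative) total
    [("positive", pos_percent), ("negative", neg_percent)]

-- ===== PORT B =====
-- one fused loop over a (positive, negative, total) accumulator triple; under Pre_ the key
-- "mood" exists, so the .getD "" default of the m["mood"] lookup is never used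
-- the loop body: classify one entry, update (positive, negative, total)
def pvStep (acc : Int × Int × Int) (m : List (String × String)) : Int × Int × Int :=
  let mood := (PySem.Dict.get? (PySem.Dict.mk m) "mood").getD ""
  if mood == "positive" then (acc.1 + 1, acc.2.1, acc.2.2 + 1)
  else if mood == "negative" then (acc.1, acc.2.1 + 1, acc.2.2 + 1)
  else if mood == "neutral" then (acc.1, acc.2.1, acc.2.2 + 1)
  else acc

def compute_percentage_py_alt (moods : List (List (String × String))) : List (String × Int) :=
  let acc := moods.foldl pvStep (0, 0, 0)
  let positive := acc.1
  let negative := acc.2.1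
  let total := acc.2.2
  if total == 0 then [("positive", 0), ("negative", 0)]
  else [("positive", PySem.Int.floordiv (100 * positive) total),
        ("negative", PySem.Int.floordiv (100 * negative) total)]

-- ===== PRECONDITION & SPEC =====
-- Pre_ excludes exactly the inputs where some entry lacks the key "mood": there Python A (and B) raise KeyError.
def Pre_compute_percentage_py (moods : List (List (String × String))) : Prop :=
  ∀ m ∈ moods, (PySem.Dict.get? (PySem.Dict.mk m) "mood").isSome = true
instance (moods : List (List (String × String))) : Decidable (Pre_compute_percentage_py moods) := by unfold Pre_compute_percentage_py; infer_instance
def pvWitness_compute_percentage_py : (List (List (String × String))) :=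
  [[("mood", "positive")], [("mood", "negative")], [("mood", "odd")]]
def Spec_compute_percentage_py (moods : List (List (String × String))) (out : List (String × Int)) : Prop := out = compute_percentage_py_alt moods
instance (moods : List (List (String × String))) (out : List (String × Int)) : Decidable (Spec_compute_percentage_py moods out) := by unfold Spec_compute_percentage_py; infer_instance

-- ===== CLAIM (what is proved, stated in full; the proofs are below) =====
def Claim_equal_compute_percentage_py : Prop := ∀ (moods : List (List (String × String))), Dom_compute_percentage_py moods → Pre_compute_percentage_py moods → Spec_compute_percentage_py moods (compute_percentage_py moods)

-- ===== LEMMAS AND PROOFS =====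

-- loop invariant: B's fused fold adds A's three per-category scan counts to the accumulator
theorem pv_fold_eq (l : List (List (String × String))) (p n t : Int) :
    l.foldl pvStep (p, n, t)
    = (p + (l.countP (fun m => PySem.Dict.get? (PySem.Dict.mk m) "mood" == some "positive") : Int),
       n + (l.countP (fun m => PySem.Dict.get? (PySem.Dict.mk m) "mood" == some "negative") : Int),
       t + (l.countP (fun m => PySem.Dict.get? (PySem.Dict.mk m) "mood" == some "positive") : Int)
         + (l.countP (fun m => PySem.Dict.get? (PySem.Dict.mk m) "mood" == some "negative") : Int)
         + (l.countP (fun m => PySem.Dict.get? (PySem.Dict.mk m) "mood" == some "neutral") : Int)) := by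
  induction l generalizing p n t with
  | nil => simp
  | cons m tl ih =>
    cases h : PySem.Dict.get? (PySem.Dict.mk m) "mood" with
    | none =>
      have hstep : pvStep (p, n, t) m = (p, n, t) := by simp [pvStep, h]
      rw [List.foldl_cons, hstep, ih]
      simp [List.countP_cons, h]
    | some v =>
      by_cases hp : v = "positive"
      · have hstep : pvStep (p, n, t) m = (p + 1, n, t + 1) := by simp [pvStep, h, hp]
        rw [List.foldl_cons, hstep, ih]
        simp only [List.countP_cons, h, hp, Prod.mk.injEq]
        push_cast
        refine ⟨by simp; ring, by simp, by simp; ring⟩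
      · by_cases hn : v = "negative"
        · have hstep : pvStep (p, n, t) m = (p, n + 1, t + 1) := by simp [pvStep, h, hp, hn]
          rw [List.foldl_cons, hstep, ih]
          simp only [List.countP_cons, h, hp, hn, Prod.mk.injEq]
          push_cast
          refine ⟨by simp [hp], by simp; ring, by simp [hp]; ring⟩
        · by_cases hu : v = "neutral"
          · have hstep : pvStep (p, n, t) m = (p, n, t + 1) := by simp [pvStep, h, hp, hn, hu]
            rw [List.foldl_cons, hstep, ih]
            simp only [List.countP_cons, h, hp, hn, hu, Prod.mk.injEq]
            push_cast
            refine ⟨by simp [hp], by simp [hn], by simp [hp, hn]; ring⟩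
          · have hstep : pvStep (p, n, t) m = (p, n, t) := by simp [pvStep, h, hp, hn, hu]
            rw [List.foldl_cons, hstep, ih]
            simp [List.countP_cons, h, hp, hn, hu]

-- ===== VERDICT (by name: the statement is the Claim_ definition above) =====
theorem compute_percentage_py_spec : Claim_equal_compute_percentage_py := by
  intro moods _ _
  show compute_percentage_py moods = compute_percentage_py_alt moods
  simp only [compute_percentage_py, compute_percentage_py_alt, pv_fold_eq, zero_add]
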